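-- pv_equiv track=rewrite | github.com/ilaese-8/Algoritmer | Lab2/LargestFraction.py | merge_find
-- ===== SOURCE A (Python) =====
-- def merge_find(arr, maxDiff):
--
--     if len(arr) > 1:
--
--         middle = len(arr)//2
--         left = arr[:middle]
--         right = arr[middle:]
--
--         merge_find(left, maxDiff)
--         merge_find(right, maxDiff)
--
--         return merge(left, right, maxDiff)
--
-- def merge(left, right, maxDiff):
--
--     i = j = 0
--
--     lowest = left[0]
--     highest = right[0]
--
--     while i < len(left):
--         if left[i] < lowest:
--             lowest = left[i]
--         i += 1
--
--     while j < len(right):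
--         if right[j] > highest:
--             highest = right[j]
--         j += 1
--
--     if highest - lowest > maxDiff[1] - maxDiff[0]:
--         maxDiff[1] = highest
--         maxDiff[0] = lowest
--
--     return maxDiff
-- ===== SOURCE B (Python) =====
-- def merge_find(arr, maxDiff):
--     # Index-based post-order recursion returning (min, max) per subrange: O(n) total,
--     # since each node combines its children in O(1) instead of rescanning the halves.
--     # Like A, mutates maxDiff in place (same final contents).
--     if len(arr) <= 1:
--         return None
--
--     def go(lo, hi, best):
--         # subrange arr[lo:hi] with hi - lo >= 1; returns (mn, mx, best)
--         if hi - lo == 1: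
--             v = arr[lo]
--             return v, v, best
--         mid = (lo + hi) // 2
--         lmn, lmx, best = go(lo, mid, best)
--         rmn, rmx, best = go(mid, hi, best)
--         if rmx - lmn > best[1] - best[0]:
--             best = (lmn, rmx)
--         return (lmn if lmn < rmn else rmn), (lmx if lmx > rmx else rmx), best
--
--     _, _, (lo0, hi0) = go(0, len(arr), (maxDiff[0], maxDiff[1]))
--     maxDiff[0] = lo0
--     maxDiff[1] = hi0
--     return maxDiff
-- ===== Notes on version B (the rewrite author's own statement) =====
-- stated objective: faster
-- what changed: Instead of re-slicing the array and rescanning both halves with while-loops at every merge node, B does one index-based post-order recursion that returns (min, max) per subrange and combines children in O(1).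
import Mathlib
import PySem

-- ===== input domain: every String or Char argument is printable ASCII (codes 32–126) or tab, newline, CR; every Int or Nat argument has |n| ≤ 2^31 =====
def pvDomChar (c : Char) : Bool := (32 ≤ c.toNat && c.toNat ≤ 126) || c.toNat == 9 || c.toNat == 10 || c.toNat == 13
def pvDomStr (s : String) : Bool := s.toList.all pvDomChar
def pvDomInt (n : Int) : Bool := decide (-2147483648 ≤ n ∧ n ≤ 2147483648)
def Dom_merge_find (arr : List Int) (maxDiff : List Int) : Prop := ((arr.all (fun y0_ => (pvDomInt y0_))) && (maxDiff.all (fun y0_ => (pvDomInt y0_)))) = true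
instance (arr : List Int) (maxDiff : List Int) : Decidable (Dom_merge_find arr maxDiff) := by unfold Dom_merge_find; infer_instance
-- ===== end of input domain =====

-- B replaces A's rescan of both halves at every merge node by an O(1) combine of
-- (min, max) returned from the children (index-based recursion, no slicing); the timing
-- run measured B faster. Both Pythons mutate maxDiff in place to the same final
-- contents; the equivalence proved here is about the return value.

-- ===== PORT A =====
-- body of the first while loop in merge: if left[i] < lowest: lowest = left[i]
def mergeLowStep (lowest v : Int) : Int := if v < lowest then v else lowest
-- body of the second while loop in merge: if right[j] > highest: highest = right[j]
def mergeHighStep (highest v : Int) : Int := if v > highest then v else highest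

-- merge(left, right, maxDiff): the two index-driven while loops are folds over left/right
def mergePy (left right maxDiff : List Int) : List Int :=
  let lowest := left.foldl mergeLowStep (PySem.List.pyGetD left 0 0)
  let highest := right.foldl mergeHighStep (PySem.List.pyGetD right 0 0)
  if highest - lowest > PySem.List.pyGetD maxDiff 1 0 - PySem.List.pyGetD maxDiff 0 0 then
    PySem.List.pySetD (PySem.List.pySetD maxDiff 1 highest) 0 lowest
  else maxDiff

-- merge_find's recursion threading the in-place-mutated maxDiff; returns its final contents.
-- arr[:middle] / arr[middle:] with middle = len(arr)//2 are exactly take/drop at middle.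
-- fuel is a totality guard only (the recursion depth is at most arr.length; fuel starts there).
def mergeFindAux (fuel : Nat) (arr maxDiff : List Int) : List Int :=
  match fuel with
  | 0 => maxDiff  -- never reached when fuel ≥ arr.length
  | fuel + 1 =>
    if 1 < arr.length then
      let middle := arr.length / 2
      let left := arr.take middle
      let right := arr.drop middle
      let md1 := mergeFindAux fuel left maxDiff
      let md2 := mergeFindAux fuel right md1
      mergePy left right md2
    else maxDiff

-- A returns None when len(arr) <= 1, else the (mutated) maxDiff
def merge_find (arr : List Int) (maxDiff : List Int) : Option (List Int) :=
  if 1 < arr.length then some (mergeFindAux arr.length arr maxDiff) else none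

-- ===== PORT B =====
-- go(lo, hi, best): returns (mn, mx, best) for subrange arr[lo:hi]; tuple unpacking → projections.
-- fuel is a totality guard only (go halves hi - lo each call; fuel starts at arr.length ≥ hi - lo).
def goB (fuel : Nat) (arr : List Int) (lo hi : Nat) (best : Int × Int) : Int × Int × Int × Int :=
  match fuel with
  | 0 => (0, 0, best)  -- never reached when fuel ≥ hi - lo ≥ 1
  | fuel + 1 =>
    if hi - lo = 1 then
      let v := arr.getD lo 0
      (v, v, best.1, best.2)
    else if lo + 1 < hi then
      let mid := (lo + hi) / 2
      let r1 := goB fuel arr lo mid best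
      let r2 := goB fuel arr mid hi r1.2.2
      let lmn := r1.1
      let lmx := r1.2.1
      let rmn := r2.1
      let rmx := r2.2.1
      let b2 := r2.2.2
      let b3 := if rmx - lmn > b2.2 - b2.1 then (lmn, rmx) else b2
      (if lmn < rmn then lmn else rmn, if lmx > rmx then lmx else rmx, b3)
    else
      (0, 0, best)  -- unreachable: go is only invoked with lo < hi

def merge_find_alt (arr : List Int) (maxDiff : List Int) : Option (List Int) :=
  if arr.length ≤ 1 then none
  else
    let best := (PySem.List.pyGetD maxDiff 0 0, PySem.List.pyGetD maxDiff 1 0)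
    let r := goB arr.length arr 0 arr.length best
    some (PySem.List.pySetD (PySem.List.pySetD maxDiff 0 r.2.2.1) 1 r.2.2.2)
-- ===== PRECONDITION & SPEC =====
-- A raises IndexError (maxDiff[1]) when len(arr) > 1 and len(maxDiff) < 2; exactly those inputs are excluded.
def Pre_merge_find (arr : List Int) (maxDiff : List Int) : Prop :=
  2 ≤ maxDiff.length ∨ arr.length ≤ 1
instance (arr : List Int) (maxDiff : List Int) : Decidable (Pre_merge_find arr maxDiff) := by
  unfold Pre_merge_find; infer_instance

def pvWitness_merge_find : List Int × List Int := ([3, 1, 2], [0, 0])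

def Spec_merge_find (arr : List Int) (maxDiff : List Int) (out : Option (List Int)) : Prop := out = merge_find_alt arr maxDiff
instance (arr : List Int) (maxDiff : List Int) (out : Option (List Int)) : Decidable (Spec_merge_find arr maxDiff out) := by unfold Spec_merge_find; infer_instance

-- ===== CLAIM (what is proved, stated in full; the proofs are below) =====
def Claim_equal_merge_find : Prop := ∀ (arr : List Int) (maxDiff : List Int), Dom_merge_find arr maxDiff → Pre_merge_find arr maxDiff → Spec_merge_find arr maxDiff (merge_find arr maxDiff)

-- ===== LEMMAS AND PROOFS =====

lemma subTake_split (arr : List Int) (lo mid hi : Nat) (h1 : lo ≤ mid) :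
    (arr.drop lo).take (hi - lo) = (arr.drop lo).take (mid - lo) ++ (arr.drop mid).take (hi - mid) ∨ hi < mid := by
  by_cases h2 : mid ≤ hi
  · left
    have e : hi - lo = (mid - lo) + (hi - mid) := by omega
    rw [e, List.take_add, List.drop_drop]
    have e2 : lo + (mid - lo) = mid := by omega
    rw [e2]
  · right; omega

lemma take_one_drop (arr : List Int) (lo : Nat) (h : lo < arr.length) :
    (arr.drop lo).take 1 = [arr.getD lo 0] := by
  rw [List.drop_eq_getElem_cons h, List.take_succ_cons, List.take_zero]
  simp [List.getD_eq_getElem?_getD, List.getElem?_eq_getElem h]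

lemma mergeLowStep_assoc (x y a : Int) :
    mergeLowStep (mergeLowStep x y) a = mergeLowStep x (mergeLowStep y a) := by
  simp only [mergeLowStep]; split_ifs <;> omega

lemma mergeHighStep_assoc (x y a : Int) :
    mergeHighStep (mergeHighStep x y) a = mergeHighStep x (mergeHighStep y a) := by
  simp only [mergeHighStep]; split_ifs <;> omega

lemma mergeLowStep_self (x : Int) : mergeLowStep x x = x := by
  simp [mergeLowStep]

lemma mergeHighStep_self (x : Int) : mergeHighStep x x = x := by
  simp [mergeHighStep]

lemma foldl_low_pull (l : List Int) (x y : Int) :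
    List.foldl mergeLowStep (mergeLowStep x y) l = mergeLowStep x (List.foldl mergeLowStep y l) := by
  induction l generalizing y with
  | nil => rfl
  | cons a l ih => simp only [List.foldl_cons, mergeLowStep_assoc, ih]

lemma foldl_high_pull (l : List Int) (x y : Int) :
    List.foldl mergeHighStep (mergeHighStep x y) l = mergeHighStep x (List.foldl mergeHighStep y l) := by
  induction l generalizing y with
  | nil => rfl
  | cons a l ih => simp only [List.foldl_cons, mergeHighStep_assoc, ih]

lemma sub_cons (arr : List Int) (lo hi : Nat) (hlt : lo < hi) (hle : hi ≤ arr.length) :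
    ∃ c cs, (arr.drop lo).take (hi - lo) = c :: cs := by
  have hlen : ((arr.drop lo).take (hi - lo)).length = hi - lo := by
    simp [List.length_take, List.length_drop]; omega
  cases hsub : (arr.drop lo).take (hi - lo) with
  | nil => rw [hsub] at hlen; simp at hlen; omega
  | cons c cs => exact ⟨c, cs, rfl⟩

lemma goB_minmax (fuel : Nat) : ∀ (arr : List Int) (lo hi : Nat) (best : Int × Int),
    hi - lo ≤ fuel → lo < hi → hi ≤ arr.length →
    (goB fuel arr lo hi best).1 =
      ((arr.drop lo).take (hi - lo)).foldl mergeLowStep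
        (PySem.List.pyGetD ((arr.drop lo).take (hi - lo)) 0 0) ∧
    (goB fuel arr lo hi best).2.1 =
      ((arr.drop lo).take (hi - lo)).foldl mergeHighStep
        (PySem.List.pyGetD ((arr.drop lo).take (hi - lo)) 0 0) := by
  induction fuel with
  | zero => intro arr lo hi best hn hlt hle; omega
  | succ fuel IH =>
  intro arr lo hi best hn hlt hle
  by_cases h1 : hi - lo = 1
  · rw [goB]
    simp only [h1]
    rw [take_one_drop arr lo (by omega)]
    refine ⟨?_, ?_⟩ <;>
      simp [PySem.List.pyGetD_zero_cons, List.foldl, mergeLowStep_self, mergeHighStep_self]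
  · have h2 : lo + 1 < hi := by omega
    have hlm : lo < (lo + hi) / 2 := by omega
    have hmh : (lo + hi) / 2 < hi := by omega
    have hml : (lo + hi) / 2 ≤ arr.length := by omega
    have IHL := IH arr lo ((lo + hi) / 2) best (by omega) hlm hml
    have IHR := IH arr ((lo + hi) / 2) hi
      (goB fuel arr lo ((lo + hi) / 2) best).2.2 (by omega) hmh hle
    rcases subTake_split arr lo ((lo + hi) / 2) hi (by omega) with hsplit | hbad
    swap
    · omega
    obtain ⟨c, cs, hL⟩ := sub_cons arr lo ((lo + hi) / 2) hlm hml
    obtain ⟨d, ds, hR⟩ := sub_cons arr ((lo + hi) / 2) hi hmh hle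
    rw [hL] at IHL
    rw [hR] at IHR
    simp only [PySem.List.pyGetD_zero_cons, List.foldl_cons, mergeLowStep_self,
      mergeHighStep_self] at IHL IHR
    rw [goB]
    simp only [if_neg h1, if_pos h2]
    rw [hsplit, hL, hR]
    simp only [List.cons_append, PySem.List.pyGetD_zero_cons, List.foldl_cons,
      mergeLowStep_self, mergeHighStep_self, List.foldl_append, foldl_low_pull,
      foldl_high_pull]
    rw [IHL.1, IHL.2, IHR.1, IHR.2]
    constructor
    · simp only [mergeLowStep]; split_ifs <;> omega
    · simp only [mergeHighStep]; split_ifs <;> omega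

lemma goB_mergeFindAux (fuel : Nat) : ∀ (arr : List Int) (lo hi : Nat) (x y : Int) (t : List Int),
    hi - lo ≤ fuel → lo < hi → hi ≤ arr.length →
    mergeFindAux fuel ((arr.drop lo).take (hi - lo)) (x :: y :: t) =
      (goB fuel arr lo hi (x, y)).2.2.1 :: (goB fuel arr lo hi (x, y)).2.2.2 :: t := by
  induction fuel with
  | zero => intro arr lo hi x y t hn hlt hle; omega
  | succ fuel IH =>
  intro arr lo hi x y t hn hlt hle
  have hsl : ((arr.drop lo).take (hi - lo)).length = hi - lo := by
    simp [List.length_take, List.length_drop]; omega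
  by_cases h1 : hi - lo = 1
  · have hnot : ¬ 1 < ((arr.drop lo).take (hi - lo)).length := by omega
    rw [mergeFindAux, if_neg hnot, goB, if_pos h1]
  · have h2 : lo + 1 < hi := by omega
    have hlm : lo < (lo + hi) / 2 := by omega
    have hmh : (lo + hi) / 2 < hi := by omega
    have hml : (lo + hi) / 2 ≤ arr.length := by omega
    have hmidL : ((arr.drop lo).take (hi - lo)).take (((arr.drop lo).take (hi - lo)).length / 2)
        = (arr.drop lo).take ((lo + hi) / 2 - lo) := by
      rw [hsl, List.take_take]
      congr 1
      omega
    have hmidR : ((arr.drop lo).take (hi - lo)).drop (((arr.drop lo).take (hi - lo)).length / 2)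
        = (arr.drop ((lo + hi) / 2)).take (hi - (lo + hi) / 2) := by
      rw [hsl, List.drop_take, List.drop_drop]
      congr 1
      · omega
      · congr 1; omega
    set r1 := goB fuel arr lo ((lo + hi) / 2) (x, y) with hr1
    set r2 := goB fuel arr ((lo + hi) / 2) hi r1.2.2 with hr2
    have hgo : goB (fuel + 1) arr lo hi (x, y) =
        (if r1.1 < r2.1 then r1.1 else r2.1,
         if r1.2.1 > r2.2.1 then r1.2.1 else r2.2.1,
         if r2.2.1 - r1.1 > r2.2.2.2 - r2.2.2.1 then (r1.1, r2.2.1) else r2.2.2) := by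
      rw [goB]
      simp only [if_neg h1, if_pos h2, ← hr1, ← hr2]
    have IHL := IH arr lo ((lo + hi) / 2) x y t (by omega) hlm hml
    rw [← hr1] at IHL
    have IHR := IH arr ((lo + hi) / 2) hi r1.2.2.1 r1.2.2.2 t (by omega) hmh hle
    rw [Prod.mk.eta, ← hr2] at IHR
    have hlow := (goB_minmax fuel arr lo ((lo + hi) / 2) (x, y) (by omega) hlm hml).1
    rw [← hr1] at hlow
    have hhigh := (goB_minmax fuel arr ((lo + hi) / 2) hi r1.2.2 (by omega) hmh hle).2
    rw [← hr2] at hhigh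
    have hcond : 1 < ((arr.drop lo).take (hi - lo)).length := by omega
    rw [mergeFindAux, if_pos hcond]
    dsimp only []
    rw [hmidL, hmidR, IHL, IHR, hgo, mergePy]
    simp only [← hlow, ← hhigh]
    by_cases hc : r2.2.1 - r1.1 > r2.2.2.2 - r2.2.2.1 <;>
      simp [pysem, hc]

-- ===== VERDICT (by name: the statement is the Claim_ definition above) =====
theorem merge_find_spec : Claim_equal_merge_find := by
  intro arr maxDiff hdom hpre
  unfold Spec_merge_find merge_find merge_find_alt
  by_cases hlen : 1 < arr.length
  · rw [if_pos hlen, if_neg (by omega : ¬ arr.length ≤ 1)]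
    have hmd : 2 ≤ maxDiff.length := by
      rcases hpre with hpre | hpre
      · exact hpre
      · omega
    match maxDiff, hmd with
    | x :: y :: t, _ =>
      have h := goB_mergeFindAux arr.length arr 0 arr.length x y t (by omega) (by omega) (le_refl _)
      rw [List.drop_zero, Nat.sub_zero, List.take_length] at h
      simp [pysem, PySem.List.pySetD, PySem.List.pySet?, PySem.List.pyIdx?, h]
      have h0 : (0:Int) ≤ (t.length:Int) + 1 := by omega
      simp [h0]
  · rw [if_neg hlen, if_pos (by omega : arr.length ≤ 1)]
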